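-- pv_equiv track=rewrite | github.com/rubenlier/rubenlier.github.io | update_holden_history.py | is_allowed_prompt
-- ===== SOURCE A (Python) =====
-- DISALLOWED_PROMPT_PATTERNS = [
--     "kanker",
--     "nazi",
--     "moeder",
--     "jood",
--     "neger",
--     "nigger",
--     "flikker",
--     "fuck",
-- ]
--
-- def is_allowed_prompt(prompt: str) -> bool:
--     if not prompt:
--         return False
--     lower = prompt.lower()
--     for bad in DISALLOWED_PROMPT_PATTERNS:
--         if bad and bad.lower() in lower:
--             return False
--     return True
-- ===== SOURCE B (Python) =====
-- DISALLOWED_PROMPT_PATTERNS = [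
--     "kanker",
--     "nazi",
--     "moeder",
--     "jood",
--     "neger",
--     "nigger",
--     "flikker",
--     "fuck",
-- ]
--
-- def is_allowed_prompt(prompt: str) -> bool:
--     # Single left-to-right scan: at each position check whether any
--     # disallowed pattern starts there, instead of one substring search
--     # per pattern.
--     if not prompt:
--         return False
--     lower = prompt.lower()
--     for i in range(len(lower)):
--         for bad in DISALLOWED_PROMPT_PATTERNS:
--             if lower.startswith(bad, i):
--                 return False
--     return True
-- ===== Notes on version B (the rewrite author's own statement) =====
-- stated objective: alternative
-- what changed: Replaces the per-pattern substring-search loop ('bad in lower' for each of the 8 patterns) by a single left-to-right scan over the prompt that checks at each position whether any pattern starts there.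
import Mathlib
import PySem

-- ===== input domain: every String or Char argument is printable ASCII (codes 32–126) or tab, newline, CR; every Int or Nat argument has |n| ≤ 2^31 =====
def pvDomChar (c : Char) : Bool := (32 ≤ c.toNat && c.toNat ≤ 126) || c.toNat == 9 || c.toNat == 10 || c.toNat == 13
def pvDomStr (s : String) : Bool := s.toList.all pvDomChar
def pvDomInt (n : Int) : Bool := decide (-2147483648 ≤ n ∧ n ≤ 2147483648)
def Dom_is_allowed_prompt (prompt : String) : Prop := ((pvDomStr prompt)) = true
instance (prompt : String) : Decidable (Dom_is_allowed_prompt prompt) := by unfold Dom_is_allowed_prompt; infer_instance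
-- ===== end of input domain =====

-- B replaces A's per-pattern substring-search loop by a single left-to-right scan of the
-- prompt that checks at each position whether any disallowed pattern starts there
-- (objective: alternative traversal, same result).

-- DISALLOWED_PROMPT_PATTERNS (module constant, shared by both programs)
def pvDisallowed : List (List Char) :=
  ["kanker".toList, "nazi".toList, "moeder".toList, "jood".toList,
   "neger".toList, "nigger".toList, "flikker".toList, "fuck".toList]

-- ===== PORT A =====
-- 'for bad in DISALLOWED_PROMPT_PATTERNS: if bad and bad.lower() in lower: return False / return True'
def pvALoop (lower : List Char) : List (List Char) → Bool
  | [] => true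
  | bad :: rest =>
      if bad ≠ [] ∧ PySem.Chars.isIn (PySem.Chars.lower bad) lower then false
      else pvALoop lower rest

def is_allowed_prompt (prompt : String) : Bool :=
  if prompt.toList = [] then false            -- 'if not prompt: return False'
  else pvALoop (PySem.Chars.lower prompt.toList) pvDisallowed

-- ===== PORT B =====
-- 'for i in range(len(lower)): for bad in PATTERNS: if lower.startswith(bad, i): return False'
-- = scan the suffixes of lower; startswith(bad, i) is bad.isPrefixOf (suffix at i)
def pvBScan : List Char → Bool
  | [] => false
  | c :: rest => pvDisallowed.any (fun p => p.isPrefixOf (c :: rest)) || pvBScan rest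

def is_allowed_prompt_alt (prompt : String) : Bool :=
  if prompt.toList = [] then false
  else !(pvBScan (PySem.Chars.lower prompt.toList))

-- ===== PRECONDITION & SPEC =====
def Spec_is_allowed_prompt (prompt : String) (out : Bool) : Prop := out = is_allowed_prompt_alt prompt
instance (prompt : String) (out : Bool) : Decidable (Spec_is_allowed_prompt prompt out) := by unfold Spec_is_allowed_prompt; infer_instance

-- ===== CLAIM (what is proved, stated in full; the proofs are below) =====
def Claim_equal_is_allowed_prompt : Prop := ∀ (prompt : String), Dom_is_allowed_prompt prompt → Spec_is_allowed_prompt prompt (is_allowed_prompt prompt)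

-- ===== LEMMAS AND PROOFS =====

theorem pv_any_or_distrib {α : Type} (l : List α) (p q : α → Bool) :
    (l.any fun x => p x || q x) = (l.any p || l.any q) := by
  induction l with
  | nil => rfl
  | cons x xs ih => simp only [List.any_cons, ih]; cases p x <;> cases q x <;> simp

-- 'sub in (c :: rest)' holds iff sub is a prefix there or 'sub in rest'
theorem pv_isIn_cons (p : List Char) (c : Char) (rest : List Char) :
    PySem.Chars.isIn p (c :: rest) = (p.isPrefixOf (c :: rest) || PySem.Chars.isIn p rest) := by
  rcases h : (p.isPrefixOf (c :: rest) || PySem.Chars.isIn p rest) with _ | _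
  · simp only [Bool.or_eq_false_iff] at h
    rw [PySem.Chars.isIn_eq_false_iff, List.infix_cons_iff]
    exact fun hc => hc.elim (fun hp => by simp [List.isPrefixOf_iff_prefix.mpr hp] at h)
      (fun hi => by simp [(PySem.Chars.isIn_iff_infix p rest).mpr hi] at h)
  · rcases Bool.or_eq_true_iff.mp h with h' | h'
    · exact (PySem.Chars.isIn_iff_infix _ _).mpr (List.infix_cons_iff.mpr (Or.inl (List.isPrefixOf_iff_prefix.mp h')))
    · exact (PySem.Chars.isIn_iff_infix _ _).mpr (List.infix_cons_iff.mpr (Or.inr ((PySem.Chars.isIn_iff_infix p rest).mp h')))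

-- B's position scan finds exactly the patterns that occur as substrings
theorem pv_bscan_eq (s : List Char) :
    pvBScan s = pvDisallowed.any (fun p => PySem.Chars.isIn p s) := by
  induction s with
  | nil => decide
  | cons c rest ih =>
      show (pvDisallowed.any (fun p => p.isPrefixOf (c :: rest)) || pvBScan rest) = _
      rw [ih, ← pv_any_or_distrib]
      simp only [pv_isIn_cons]

-- A's early-return loop is the negation of an 'any' over the pattern list
theorem pv_aloop_eq (l : List Char) (pats : List (List Char)) :
    pvALoop l pats = !(pats.any fun bad => decide (bad ≠ []) && PySem.Chars.isIn (PySem.Chars.lower bad) l) := by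
  induction pats with
  | nil => rfl
  | cons bad rest ih =>
      show (if bad ≠ [] ∧ PySem.Chars.isIn (PySem.Chars.lower bad) l then false else pvALoop l rest) = _
      by_cases h : bad ≠ [] ∧ PySem.Chars.isIn (PySem.Chars.lower bad) l
      · simp [List.any_cons, h]
      · have hf : (decide (bad ≠ []) && PySem.Chars.isIn (PySem.Chars.lower bad) l) = false := by
          rcases Decidable.not_and_iff_not_or_not.mp h with h' | h' <;> simp [h']
        rw [if_neg h, ih, List.any_cons, hf, Bool.false_or]

-- ===== VERDICT (by name: the statement is the Claim_ definition above) =====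
theorem is_allowed_prompt_spec : Claim_equal_is_allowed_prompt := by
  intro prompt _
  unfold Spec_is_allowed_prompt is_allowed_prompt is_allowed_prompt_alt
  by_cases h : prompt.toList = []
  · simp [h]
  · rw [if_neg h, if_neg h, pv_bscan_eq, pv_aloop_eq]
    have h0 : PySem.Chars.lower ['k', 'a', 'n', 'k', 'e', 'r'] = ['k', 'a', 'n', 'k', 'e', 'r'] := by decide
    have h1 : PySem.Chars.lower ['n', 'a', 'z', 'i'] = ['n', 'a', 'z', 'i'] := by decide
    have h2 : PySem.Chars.lower ['m', 'o', 'e', 'd', 'e', 'r'] = ['m', 'o', 'e', 'd', 'e', 'r'] := by decide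
    have h3 : PySem.Chars.lower ['j', 'o', 'o', 'd'] = ['j', 'o', 'o', 'd'] := by decide
    have h4 : PySem.Chars.lower ['n', 'e', 'g', 'e', 'r'] = ['n', 'e', 'g', 'e', 'r'] := by decide
    have h5 : PySem.Chars.lower ['n', 'i', 'g', 'g', 'e', 'r'] = ['n', 'i', 'g', 'g', 'e', 'r'] := by decide
    have h6 : PySem.Chars.lower ['f', 'l', 'i', 'k', 'k', 'e', 'r'] = ['f', 'l', 'i', 'k', 'k', 'e', 'r'] := by decide
    have h7 : PySem.Chars.lower ['f', 'u', 'c', 'k'] = ['f', 'u', 'c', 'k'] := by decide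
    simp [pvDisallowed, List.any_cons, h0, h1, h2, h3, h4, h5, h6, h7]
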